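-- pv_equiv track=rewrite | github.com/lroolle/CodingInPython | algorithms/google_foobar/gearing_up4destruction.py | my_answer
-- ===== SOURCE A (Python) =====
-- def my_answer(pegs):
--     i = 0
--     pegs_len = len(pegs)
--     max_size = pegs[1] - pegs[0] - 1
--
--     while i < max_size:
--         i += 1
--         gear_size_list = [i]
--         for j in range(1, pegs_len):
--             gear_size = pegs[j] - (pegs[j - 1] + gear_size_list[-1])
--             gear_size_list.append(gear_size)
--
--             # gear_size <= 0 which absolutely does not exist
--             if gear_size <= 0:
--                 break
--
--         last_gear_diameter = 2 * gear_size_list[-1]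
--
--         if last_gear_diameter <= 0:
--             continue
--         elif last_gear_diameter == i:
--             return [i, 1]
--         elif last_gear_diameter == i + 1:
--             return [i * 3 + 1, 3]
--         elif last_gear_diameter == i + 2:
--             return [i * 3 + 2, 3]
--
--     return [-1, -1]
-- ===== SOURCE B (Python) =====
-- def _chain_positive(pegs, i):
--     g = i
--     for j in range(1, len(pegs)):
--         g = pegs[j] - pegs[j - 1] - g
--         if g <= 0:
--             return False
--     return True
--
--
-- def my_answer(pegs):
--     n = len(pegs)
--     max_size = pegs[1] - pegs[0] - 1
--     # C = last gear size for first radius 0; last(i) = C + s*i with s = (-1)^(n-1)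
--     c = 0
--     for j in range(1, n):
--         c = pegs[j] - pegs[j - 1] - c
--     if n % 2 == 0:
--         # last(i) = C - i; 2*(C - i) = i + k  =>  i = (2C - k) / 3, k = 2C mod 3
--         k = (2 * c) % 3
--         cands = [((2 * c - k) // 3, k)]
--     else:
--         # last(i) = C + i; 2*(C + i) = i + k  =>  i = k - 2C
--         cands = [(-2 * c, 0), (1 - 2 * c, 1), (2 - 2 * c, 2)]
--     for i, k in cands:
--         if 1 <= i <= max_size and _chain_positive(pegs, i):
--             return [i, 1] if k == 0 else [3 * i + k, 3]
--     return [-1, -1]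
-- ===== Notes on version B (the rewrite author's own statement) =====
-- stated objective: alternative
-- what changed: Replaces A's linear scan over every candidate first-gear radius i = 1..pegs[1]-pegs[0]-1 (rebuilding the whole gear chain for each i) by the closed form: the last gear size is an affine function C ± i of the first radius (C = alternating sum of peg gaps), which pins down at most three candidate radii that are each checked once; iteration count no longer depends on the peg gap.
import Mathlib
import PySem

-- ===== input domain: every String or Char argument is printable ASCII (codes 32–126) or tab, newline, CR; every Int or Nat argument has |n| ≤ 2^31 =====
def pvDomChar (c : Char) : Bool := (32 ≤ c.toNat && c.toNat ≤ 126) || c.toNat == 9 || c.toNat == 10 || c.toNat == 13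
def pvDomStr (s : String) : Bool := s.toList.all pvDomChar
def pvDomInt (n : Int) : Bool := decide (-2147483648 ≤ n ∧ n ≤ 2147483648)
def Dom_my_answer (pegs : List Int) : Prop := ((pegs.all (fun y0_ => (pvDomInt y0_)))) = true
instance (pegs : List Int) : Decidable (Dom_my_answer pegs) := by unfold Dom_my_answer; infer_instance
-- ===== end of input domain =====

-- B replaces A's scan of every candidate first radius 1..pegs[1]-pegs[0]-1 by the closed-form
-- affine formula for the last gear size, leaving at most three candidate radii to check.

-- ===== PORT A =====
-- inner `for j in range(1, pegs_len)` loop: builds gear_size_list, breaking on a non-positive gear.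
-- fuel counts the remaining iterations (= pegs_len - j at every call).
-- gear_size_list is always non-empty, so `pyGet? gsl (-1)` is `some _` and `.getD 0` never defaults;
-- pegs[j], pegs[j-1] are in range for j < len(pegs), so their `.getD 0` never defaults either.
def aInner (pegs : List Int) (fuel : Nat) (j : Nat) (gsl : List Int) : List Int :=
  match fuel with
  | 0 => gsl
  | f + 1 =>
    let gear := (PySem.List.pyGet? pegs (j : Int)).getD 0 -
      ((PySem.List.pyGet? pegs ((j : Int) - 1)).getD 0 + (PySem.List.pyGet? gsl (-1)).getD 0)
    if gear ≤ 0 then gsl ++ [gear] else aInner pegs f (j + 1) (gsl ++ [gear])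
termination_by structural fuel

-- the `while i < max_size` loop of A; fuel = (max_size - i).toNat counts the remaining iterations,
-- so fuel = 0 exactly when the loop condition i < max_size fails
def aLoop (pegs : List Int) (n : Nat) (ms : Int) (i : Int) (fuel : Nat) : List Int :=
  match fuel with
  | 0 => [-1, -1]
  | f + 1 =>
    let i' := i + 1
    let gsl := aInner pegs (n - 1) 1 [i']
    let d := 2 * (PySem.List.pyGet? gsl (-1)).getD 0
    if d ≤ 0 then aLoop pegs n ms i' f
    else if d = i' then [i', 1]
    else if d = i' + 1 then [i' * 3 + 1, 3]
    else if d = i' + 2 then [i' * 3 + 2, 3]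
    else aLoop pegs n ms i' f
termination_by structural fuel

-- Python raises IndexError on pegs[1] when len(pegs) < 2; Pre_ excludes that, so `.getD 0` never defaults.
def my_answer (pegs : List Int) : List Int :=
  aLoop pegs pegs.length
    ((PySem.List.pyGet? pegs 1).getD 0 - (PySem.List.pyGet? pegs 0).getD 0 - 1) 0
    ((PySem.List.pyGet? pegs 1).getD 0 - (PySem.List.pyGet? pegs 0).getD 0 - 1).toNat

-- ===== PORT B =====
-- c accumulator loop of Source B (c := pegs[j] - pegs[j-1] - c for j = 1..n-1); fuel = n - j
def bC (pegs : List Int) (fuel : Nat) (j : Nat) (c : Int) : Int :=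
  match fuel with
  | 0 => c
  | f + 1 =>
    bC pegs f (j + 1)
      ((PySem.List.pyGet? pegs (j : Int)).getD 0 - (PySem.List.pyGet? pegs ((j : Int) - 1)).getD 0 - c)
termination_by structural fuel

-- _chain_positive of Source B; fuel = n - j
def bChain (pegs : List Int) (fuel : Nat) (j : Nat) (g : Int) : Bool :=
  match fuel with
  | 0 => true
  | f + 1 =>
    let g' := (PySem.List.pyGet? pegs (j : Int)).getD 0 - (PySem.List.pyGet? pegs ((j : Int) - 1)).getD 0 - g
    if g' ≤ 0 then false else bChain pegs f (j + 1) g'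
termination_by structural fuel

-- the `for i, k in cands` loop of Source B; nf = n - 1 is _chain_positive's iteration count
def bPick (pegs : List Int) (nf : Nat) (ms : Int) : List (Int × Int) → List Int
  | [] => [-1, -1]
  | (i, k) :: rest =>
    if 1 ≤ i ∧ i ≤ ms ∧ bChain pegs nf 1 i then
      (if k = 0 then [i, 1] else [3 * i + k, 3])
    else bPick pegs nf ms rest

def my_answer_alt (pegs : List Int) : List Int :=
  let n := pegs.length
  let ms := (PySem.List.pyGet? pegs 1).getD 0 - (PySem.List.pyGet? pegs 0).getD 0 - 1
  let c := bC pegs (n - 1) 1 0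
  let cands : List (Int × Int) :=
    if n % 2 = 0 then
      let k := PySem.Int.mod (2 * c) 3
      [(PySem.Int.floordiv (2 * c - k) 3, k)]
    else
      [(-2 * c, 0), (1 - 2 * c, 1), (2 - 2 * c, 2)]
  bPick pegs (n - 1) ms cands

-- ===== PRECONDITION & SPEC =====
-- Python A evaluates pegs[1] unconditionally, so it raises IndexError on lists of length < 2.
def Pre_my_answer (pegs : List Int) : Prop := 2 ≤ pegs.length
instance (pegs : List Int) : Decidable (Pre_my_answer pegs) := by unfold Pre_my_answer; infer_instance
def pvWitness_my_answer : List Int := [4, 30, 50]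

def Spec_my_answer (pegs : List Int) (out : List Int) : Prop := out = my_answer_alt pegs
instance (pegs : List Int) (out : List Int) : Decidable (Spec_my_answer pegs out) := by unfold Spec_my_answer; infer_instance

-- ===== CLAIM (what is proved, stated in full; the proofs are below) =====
def Claim_equal_my_answer : Prop := ∀ (pegs : List Int), Dom_my_answer pegs → Pre_my_answer pegs → Spec_my_answer pegs (my_answer pegs)

-- ===== LEMMAS AND PROOFS =====

-- peg gap at index j (as the ports index it)
def dv (pegs : List Int) (j : Nat) : Int :=
  (PySem.List.pyGet? pegs (j : Int)).getD 0 - (PySem.List.pyGet? pegs ((j : Int) - 1)).getD 0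

-- gear size at peg j when the first gear has radius i
def gval (pegs : List Int) (i : Int) : Nat → Int
  | 0 => i
  | j + 1 => dv pegs (j + 1) - gval pegs i j

lemma gval_succ_of_le (pegs : List Int) (i : Int) {j : Nat} (h : 1 ≤ j) :
    gval pegs i j = dv pegs j - gval pegs i (j - 1) := by
  cases j with
  | zero => omega
  | succ m => simp [gval]

lemma gval_affine (pegs : List Int) (i : Int) (j : Nat) :
    gval pegs i j = gval pegs 0 j + (if j % 2 = 0 then i else -i) := by
  induction j with
  | zero => simp [gval]
  | succ m ih =>
    rcases Nat.mod_two_eq_zero_or_one m with h | h <;>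
      simp [gval, ih, h, Nat.succ_mod_two_eq_zero_iff] <;> ring

lemma bC_gval (pegs : List Int) (i : Int) :
    ∀ (fuel j : Nat), 1 ≤ j →
      bC pegs fuel j (gval pegs i (j - 1)) = gval pegs i (fuel + j - 1) := by
  intro fuel
  induction fuel with
  | zero => intro j h1; simp [bC]
  | succ f ih =>
    intro j h1
    rw [bC]
    have hg : (PySem.List.pyGet? pegs (j : Int)).getD 0 -
        (PySem.List.pyGet? pegs ((j : Int) - 1)).getD 0 - gval pegs i (j - 1) = gval pegs i j := by
      rw [gval_succ_of_le pegs i h1, dv]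
    have hj : gval pegs i j = gval pegs i ((j + 1) - 1) := by norm_num
    rw [hg, hj, ih (j + 1) (by omega)]
    congr 1
    omega

lemma bChain_iff (pegs : List Int) (i : Int) :
    ∀ (fuel j : Nat), 1 ≤ j →
      (bChain pegs fuel j (gval pegs i (j - 1)) = true ↔
        ∀ m : Nat, j ≤ m → m < j + fuel → 0 < gval pegs i m) := by
  intro fuel
  induction fuel with
  | zero =>
    intro j h1
    rw [bChain]
    constructor
    · intro _ m hm hmn; omega
    · intro _; trivial
  | succ f ih =>
    intro j h1
    rw [bChain]
    have hg : (PySem.List.pyGet? pegs (j : Int)).getD 0 -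
        (PySem.List.pyGet? pegs ((j : Int) - 1)).getD 0 - gval pegs i (j - 1) = gval pegs i j := by
      rw [gval_succ_of_le pegs i h1, dv]
    rw [hg]
    by_cases hp : gval pegs i j ≤ 0
    · simp only [hp, if_pos]
      constructor
      · intro hfalse; exact absurd hfalse (by simp)
      · intro hall; exact absurd (hall j le_rfl (by omega)) (by omega)
    · simp only [hp, if_neg, not_false_iff]
      have hrec := ih (j + 1) (by omega)
      simp only [Nat.add_sub_cancel] at hrec
      rw [hrec]
      constructor
      · intro hall m hm hmn
        rcases Nat.eq_or_lt_of_le hm with rfl | hlt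
        · omega
        · exact hall m (by omega) (by omega)
      · intro hall m hm hmn; exact hall m (by omega) (by omega)

lemma aInner_last_true (pegs : List Int) :
    ∀ (fuel j : Nat) (gsl : List Int) (g : Int),
      (PySem.List.pyGet? gsl (-1)).getD 0 = g → bChain pegs fuel j g = true →
      (PySem.List.pyGet? (aInner pegs fuel j gsl) (-1)).getD 0 = bC pegs fuel j g := by
  intro fuel
  induction fuel with
  | zero => intro j gsl g hlast _; simpa [aInner, bC] using hlast
  | succ f ih =>
    intro j gsl g hlast hch
    rw [aInner, bC, bChain] at *
    rw [hlast]
    set g' := (PySem.List.pyGet? pegs (j : Int)).getD 0 -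
      (PySem.List.pyGet? pegs ((j : Int) - 1)).getD 0 - g with hg'
    have harr : (PySem.List.pyGet? pegs (j : Int)).getD 0 -
        ((PySem.List.pyGet? pegs ((j : Int) - 1)).getD 0 + g) = g' := by rw [hg']; ring
    rw [harr]
    by_cases hp : g' ≤ 0
    · simp only [hp, if_pos] at hch; exact absurd hch (by simp)
    · simp only [hp, if_neg, not_false_iff] at hch ⊢
      exact ih (j + 1) (gsl ++ [g']) g'
        (by rw [PySem.List.pyGet?_neg_one, List.getLast?_concat]; rfl) hch

lemma aInner_last_false (pegs : List Int) :
    ∀ (fuel j : Nat) (gsl : List Int) (g : Int),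
      (PySem.List.pyGet? gsl (-1)).getD 0 = g → bChain pegs fuel j g = false →
      (PySem.List.pyGet? (aInner pegs fuel j gsl) (-1)).getD 0 ≤ 0 := by
  intro fuel
  induction fuel with
  | zero => intro j gsl g _ hch; rw [bChain] at hch; simp at hch
  | succ f ih =>
    intro j gsl g hlast hch
    rw [aInner]
    rw [bChain] at hch
    rw [hlast]
    set g' := (PySem.List.pyGet? pegs (j : Int)).getD 0 -
      (PySem.List.pyGet? pegs ((j : Int) - 1)).getD 0 - g with hg'
    have harr : (PySem.List.pyGet? pegs (j : Int)).getD 0 -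
        ((PySem.List.pyGet? pegs ((j : Int) - 1)).getD 0 + g) = g' := by rw [hg']; ring
    rw [harr]
    by_cases hp : g' ≤ 0
    · simp only [hp, if_pos]
      rw [PySem.List.pyGet?_neg_one, List.getLast?_concat]; simpa using hp
    · simp only [hp, if_neg, not_false_iff] at hch ⊢
      exact ih (j + 1) (gsl ++ [g']) g'
        (by rw [PySem.List.pyGet?_neg_one, List.getLast?_concat]; rfl) hch

-- proof-side version of bPick that only admits candidates strictly above t
def pickAbove (pegs : List Int) (nf : Nat) (ms t : Int) : List (Int × Int) → List Int
  | [] => [-1, -1]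
  | (c, k) :: rest =>
    if t < c ∧ c ≤ ms ∧ bChain pegs nf 1 c then
      (if k = 0 then [c, 1] else [3 * c + k, 3])
    else pickAbove pegs nf ms t rest

lemma bPick_eq_pickAbove (pegs : List Int) (nf : Nat) (ms : Int) (l : List (Int × Int)) :
    bPick pegs nf ms l = pickAbove pegs nf ms 0 l := by
  induction l with
  | nil => rfl
  | cons p rest ih =>
    obtain ⟨c, k⟩ := p
    rw [bPick, pickAbove]
    by_cases h : 1 ≤ c ∧ c ≤ ms ∧ bChain pegs nf 1 c
    · have h' : 0 < c ∧ c ≤ ms ∧ bChain pegs nf 1 c = true := ⟨by omega, h.2⟩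
      rw [if_pos h, if_pos h']
    · have h' : ¬ (0 < c ∧ c ≤ ms ∧ bChain pegs nf 1 c = true) := by
        intro h'; exact h ⟨by omega, h'.2⟩
      rw [if_neg h, if_neg h', ih]

lemma pickAbove_none (pegs : List Int) (nf : Nat) (ms t : Int) (l : List (Int × Int))
    (h : ∀ p ∈ l, ¬ (t < p.1 ∧ p.1 ≤ ms)) : pickAbove pegs nf ms t l = [-1, -1] := by
  induction l with
  | nil => rfl
  | cons p rest ih =>
    obtain ⟨c, k⟩ := p
    rw [pickAbove, if_neg, ih]
    · intro q hq; exact h q (List.mem_cons_of_mem _ hq)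
    · intro h'; exact h (c, k) List.mem_cons_self ⟨h'.1, h'.2.1⟩

lemma pickAbove_shift (pegs : List Int) (nf : Nat) (ms t : Int) (l : List (Int × Int))
    (h : ∀ p ∈ l, p.1 = t + 1 → ¬ (p.1 ≤ ms ∧ bChain pegs nf 1 p.1)) :
    pickAbove pegs nf ms t l = pickAbove pegs nf ms (t + 1) l := by
  induction l with
  | nil => rfl
  | cons p rest ih =>
    obtain ⟨c, k⟩ := p
    rw [pickAbove, pickAbove]
    by_cases hc : c = t + 1
    · rw [if_neg, if_neg]
      · exact ih fun q hq => h q (List.mem_cons_of_mem _ hq)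
      · intro h'; omega
      · intro h'; exact h (c, k) List.mem_cons_self hc ⟨h'.2.1, h'.2.2⟩
    · have heq : (t < c ∧ c ≤ ms ∧ bChain pegs nf 1 c = true) ↔
          (t + 1 < c ∧ c ≤ ms ∧ bChain pegs nf 1 c = true) := by
        constructor <;> (intro h'; exact ⟨by omega, h'.2⟩)
      by_cases hcond : t < c ∧ c ≤ ms ∧ bChain pegs nf 1 c = true
      · rw [if_pos hcond, if_pos (heq.mp hcond)]
      · rw [if_neg hcond, if_neg (fun h' => hcond (heq.mpr h')),
          ih fun q hq => h q (List.mem_cons_of_mem _ hq)]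

lemma pickAbove_hit (pegs : List Int) (nf : Nat) (ms t : Int) (l : List (Int × Int))
    (hso : l.Pairwise (fun p q => p.1 < q.1)) (c k : Int) (hmem : (c, k) ∈ l)
    (hc : c = t + 1) (hms : c ≤ ms) (hch : bChain pegs nf 1 c = true) :
    pickAbove pegs nf ms t l = (if k = 0 then [c, 1] else [3 * c + k, 3]) := by
  induction l with
  | nil => simp at hmem
  | cons p rest ih =>
    obtain ⟨c', k'⟩ := p
    rw [pickAbove]
    rcases List.mem_cons.mp hmem with heq | hmem'
    · simp only [Prod.mk.injEq] at heq
      have h' : t < c' ∧ c' ≤ ms ∧ bChain pegs nf 1 c' = true :=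
        ⟨by omega, heq.1 ▸ hms, heq.1 ▸ hch⟩
      rw [if_pos h', ← heq.1, ← heq.2]
    · have hlt : c' < c := (List.pairwise_cons.mp hso).1 (c, k) hmem'
      rw [if_neg, ih (List.pairwise_cons.mp hso).2 hmem']
      intro h'; omega

-- A's while loop, related to the candidate list
lemma loop_eq (pegs : List Int) (n : Nat) (ms : Int) (cands : List (Int × Int))
    (hn : 2 ≤ n)
    (hso : cands.Pairwise (fun p q => p.1 < q.1))
    (hcand : ∀ i k : Int, (i, k) ∈ cands ↔ (2 * gval pegs i (n - 1) = i + k ∧ 0 ≤ k ∧ k ≤ 2)) :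
    ∀ (fuel : Nat) (i : Int), (ms - i).toNat = fuel →
      aLoop pegs n ms i fuel = pickAbove pegs (n - 1) ms i cands := by
  intro fuel
  induction fuel with
  | zero =>
    intro i hf
    rw [aLoop]
    exact (pickAbove_none pegs (n - 1) ms i cands (by intro p _ h'; omega)).symm
  | succ f ih =>
    intro i hf
    have h : i < ms := by omega
    rw [aLoop]
    have hlast0 : (PySem.List.pyGet? [i + 1] (-1)).getD 0 = gval pegs (i + 1) 0 := by
      simp [gval, PySem.List.pyGet?_neg_one]
    have hbc : bC pegs (n - 1) 1 (gval pegs (i + 1) 0) = gval pegs (i + 1) (n - 1) := by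
      have := bC_gval pegs (i + 1) (n - 1) 1 le_rfl
      simpa using this
    by_cases hch : bChain pegs (n - 1) 1 (i + 1) = true
    · -- chain survives: A's last gear is gval pegs (i+1) (n-1)
      have hch0 : bChain pegs (n - 1) 1 (gval pegs (i + 1) 0) = true := by
        simpa [gval] using hch
      have hlast := aInner_last_true pegs (n - 1) 1 [i + 1] (gval pegs (i + 1) 0) hlast0 hch0
      rw [hbc] at hlast
      rw [hlast]
      have hall := bChain_iff pegs (i + 1) (n - 1) 1 le_rfl
      rw [Nat.sub_self] at hall
      simp only [gval] at hall
      have hLpos : 0 < gval pegs (i + 1) (n - 1) :=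
        (hall.mp hch) (n - 1) (by omega) (by omega)
      rw [if_neg (show ¬ 2 * gval pegs (i + 1) (n - 1) ≤ 0 by omega)]
      by_cases h0 : 2 * gval pegs (i + 1) (n - 1) = i + 1
      · rw [if_pos h0]
        have hmem := (hcand (i + 1) 0).mpr ⟨by omega, le_rfl, by omega⟩
        rw [pickAbove_hit pegs (n - 1) ms i cands hso (i + 1) 0 hmem rfl (by omega) hch]
        norm_num
      · rw [if_neg h0]
        by_cases h1 : 2 * gval pegs (i + 1) (n - 1) = i + 1 + 1
        · rw [if_pos h1]
          have hmem := (hcand (i + 1) 1).mpr ⟨by omega, by omega, by omega⟩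
          rw [pickAbove_hit pegs (n - 1) ms i cands hso (i + 1) 1 hmem rfl (by omega) hch]
          norm_num
          ring
        · rw [if_neg h1]
          by_cases h2 : 2 * gval pegs (i + 1) (n - 1) = i + 1 + 2
          · rw [if_pos h2]
            have hmem := (hcand (i + 1) 2).mpr ⟨by omega, by omega, by omega⟩
            rw [pickAbove_hit pegs (n - 1) ms i cands hso (i + 1) 2 hmem rfl (by omega) hch]
            norm_num
            ring
          · rw [if_neg h2, ih (i + 1) (by omega)]
            refine (pickAbove_shift pegs (n - 1) ms i cands ?_).symm
            rintro ⟨c, k⟩ hmem hc1 hcc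
            subst hc1
            have hk := (hcand _ _).mp hmem
            omega
    · -- chain broke: A's last gear is non-positive, both sides skip i + 1
      have hch0 : bChain pegs (n - 1) 1 (gval pegs (i + 1) 0) = false := by
        simpa [gval] using (Bool.not_eq_true _).mp hch
      have hlast := aInner_last_false pegs (n - 1) 1 [i + 1] (gval pegs (i + 1) 0) hlast0 hch0
      rw [if_pos (by omega), ih (i + 1) (by omega)]
      refine (pickAbove_shift pegs (n - 1) ms i cands ?_).symm
      rintro ⟨c, k⟩ hmem hc1 hcc
      subst hc1
      have hfalse : bChain pegs (n - 1) 1 (i + 1) = false := by simpa [gval] using hch0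
      rw [hfalse] at hcc
      exact absurd hcc.2 (by simp)

-- candidate-list characterization, even case: last(i) = c - i
lemma hcand_even (pegs : List Int) (n : Nat) (c : Int) (hn : 2 ≤ n) (hpar : n % 2 = 0)
    (hc : c = gval pegs 0 (n - 1)) (i k : Int) :
    ((i, k) ∈ ([(PySem.Int.floordiv (2 * c - PySem.Int.mod (2 * c) 3) 3,
        PySem.Int.mod (2 * c) 3)] : List (Int × Int))) ↔
      (2 * gval pegs i (n - 1) = i + k ∧ 0 ≤ k ∧ k ≤ 2) := by
  have haff := gval_affine pegs i (n - 1)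
  have hodd : (n - 1) % 2 = 1 := by omega
  rw [hodd] at haff
  simp only [show (1 : Nat) ≠ 0 from one_ne_zero, reduceIte] at haff
  rw [haff, ← hc]
  rw [PySem.Int.mod_eq_emod_of_pos (show (0:Int) < 3 by omega),
    PySem.Int.floordiv_eq_ediv_of_pos (show (0:Int) < 3 by omega)]
  simp only [List.mem_singleton, Prod.mk.injEq]
  omega

-- candidate-list characterization, odd case: last(i) = c + i
lemma hcand_odd (pegs : List Int) (n : Nat) (c : Int) (hn : 2 ≤ n) (hpar : n % 2 = 1)
    (hc : c = gval pegs 0 (n - 1)) (i k : Int) :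
    ((i, k) ∈ ([(-2 * c, 0), (1 - 2 * c, 1), (2 - 2 * c, 2)] : List (Int × Int))) ↔
      (2 * gval pegs i (n - 1) = i + k ∧ 0 ≤ k ∧ k ≤ 2) := by
  have haff := gval_affine pegs i (n - 1)
  have hodd : (n - 1) % 2 = 0 := by omega
  rw [hodd] at haff
  simp only [reduceIte] at haff
  rw [haff, ← hc]
  simp only [List.mem_cons, List.not_mem_nil, or_false, Prod.mk.injEq]
  omega

-- ===== VERDICT (by name: the statement is the Claim_ definition above) =====
theorem my_answer_spec : Claim_equal_my_answer := by
  intro pegs _hdom hpre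
  unfold Pre_my_answer at hpre
  unfold Spec_my_answer
  set n := pegs.length with hn
  set ms := (PySem.List.pyGet? pegs 1).getD 0 - (PySem.List.pyGet? pegs 0).getD 0 - 1 with hms
  set c := bC pegs (n - 1) 1 0 with hcdef
  have hc : c = gval pegs 0 (n - 1) := by
    rw [hcdef]
    have := bC_gval pegs 0 (n - 1) 1 le_rfl
    simpa [gval] using this
  have hA : my_answer pegs = aLoop pegs n ms 0 ms.toNat := rfl
  by_cases hpar : n % 2 = 0
  · have hB : my_answer_alt pegs =
        bPick pegs (n - 1) ms [(PySem.Int.floordiv (2 * c - PySem.Int.mod (2 * c) 3) 3,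
          PySem.Int.mod (2 * c) 3)] := by
      show bPick pegs (n - 1) ms (if n % 2 = 0 then _ else _) = _
      rw [if_pos hpar]
    rw [hA, hB, bPick_eq_pickAbove]
    exact loop_eq pegs n ms _ hpre (by simp)
      (hcand_even pegs n c hpre hpar hc) ms.toNat 0 (by omega)
  · have hB : my_answer_alt pegs =
        bPick pegs (n - 1) ms [(-2 * c, 0), (1 - 2 * c, 1), (2 - 2 * c, 2)] := by
      show bPick pegs (n - 1) ms (if n % 2 = 0 then _ else _) = _
      rw [if_neg hpar]
    rw [hA, hB, bPick_eq_pickAbove]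
    refine loop_eq pegs n ms _ hpre ?_
      (hcand_odd pegs n c hpre (by omega) hc) ms.toNat 0 (by omega)
    refine List.pairwise_cons.mpr ⟨?_, List.pairwise_cons.mpr ⟨?_, ?_⟩⟩
    · rintro q hq
      rcases List.mem_cons.mp hq with rfl | hq'
      · simp
      · rcases List.mem_cons.mp hq' with rfl | hq''
        · simp
        · simp at hq''
    · rintro q hq
      rcases List.mem_cons.mp hq with rfl | hq'
      · simp
      · simp at hq'
    · simp
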